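-- pv_equiv track=rewrite | github.com/hackerspace-silesia/adventofcode | 2020/4/noemiko/first.py | complete_all_passports
-- ===== SOURCE A (Python) =====
-- from typing import Optional, Dict, List
--
-- def complete_all_passports(raw_lines: List[str]):
--     """
--     :param raw_lines: every list is representation of file line,
--     every passport is separated by empty line
--     :return:
--     """
--     complete_passports = []
--     buffor = []
--     for file_line in raw_lines:
--         if file_line == "\n":
--             complete_passports.append(buffor)
--             buffor = []
--             continue
--         buffor.append(file_line)
--     complete_passports.append(buffor)
--     return complete_passports
-- ===== SOURCE B (Python) =====
-- def complete_all_passports(raw_lines):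
--     """
--     :param raw_lines: every list is representation of file line,
--     every passport is separated by empty line
--     :return:
--     """
--     delims = [i for i, line in enumerate(raw_lines) if line == "\n"]
--     result = []
--     start = 0
--     for d in delims:
--         result.append(raw_lines[start:d])
--         start = d + 1
--     result.append(raw_lines[start:])
--     return result
-- ===== Notes on version B (the rewrite author's own statement) =====
-- stated objective: alternative
-- what changed: B first collects the indices of all blank-line delimiters and then builds the passports by slicing the input between consecutive delimiters, instead of A's single pass that grows a buffer line by line.
import Mathlib
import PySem

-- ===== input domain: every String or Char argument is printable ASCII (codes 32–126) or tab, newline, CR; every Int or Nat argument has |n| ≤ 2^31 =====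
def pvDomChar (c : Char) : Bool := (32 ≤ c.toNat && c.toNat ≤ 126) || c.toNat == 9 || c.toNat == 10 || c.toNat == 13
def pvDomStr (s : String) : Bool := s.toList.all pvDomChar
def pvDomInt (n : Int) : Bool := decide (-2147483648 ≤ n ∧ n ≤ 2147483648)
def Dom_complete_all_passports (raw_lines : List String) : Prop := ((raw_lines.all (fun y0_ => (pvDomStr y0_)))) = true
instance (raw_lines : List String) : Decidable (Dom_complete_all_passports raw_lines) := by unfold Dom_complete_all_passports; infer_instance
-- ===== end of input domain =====

-- B collects blank-line indices first and builds the passports by slicing between them,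
-- instead of A's line-by-line buffer accumulation; alternative decomposition, same cost.


-- ===== PORT A =====
def pvStepA (st : List (List String) × List String) (file_line : String) :
    List (List String) × List String :=
  if file_line == "\n" then (st.1 ++ [st.2], [])
  else (st.1, st.2 ++ [file_line])

def complete_all_passports (raw_lines : List String) : List (List String) :=
  let r := raw_lines.foldl pvStepA ([], [])
  r.1 ++ [r.2]

-- ===== PORT B =====
-- the list comprehension: indices of the lines equal to "\n"
def pvDelims (raw_lines : List String) : List Int :=
  ((PySem.List.enumerate raw_lines 0).filter (fun p => p.2 == "\n")).map (·.1)

def pvStepB (raw_lines : List String) (st : List (List String) × Int) (d : Int) :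
    List (List String) × Int :=
  (st.1 ++ [PySem.List.slice raw_lines (some st.2) (some d)], d + 1)

def complete_all_passports_alt (raw_lines : List String) : List (List String) :=
  let r := (pvDelims raw_lines).foldl (pvStepB raw_lines) ([], 0)
  r.1 ++ [PySem.List.slice raw_lines (some r.2) none]

-- ===== PRECONDITION & SPEC =====
def Spec_complete_all_passports (raw_lines : List String) (out : List (List String)) : Prop := out = complete_all_passports_alt raw_lines
instance (raw_lines : List String) (out : List (List String)) : Decidable (Spec_complete_all_passports raw_lines out) := by unfold Spec_complete_all_passports; infer_instance

-- ===== CLAIM (what is proved, stated in full; the proofs are below) =====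
def Claim_equal_complete_all_passports : Prop := ∀ (raw_lines : List String), Dom_complete_all_passports raw_lines → Spec_complete_all_passports raw_lines (complete_all_passports raw_lines)

-- ===== LEMMAS AND PROOFS =====

-- common recursive characterisation of the grouping
def pvSpl : List String → List (List String)
  | [] => [[]]
  | x :: xs => if x == "\n" then [] :: pvSpl xs else (pvSpl xs).modifyHead (x :: ·)

theorem pvModifyHead_id {α : Type} (l : List α) :
    l.modifyHead (fun a => a) = l := by
  cases l <;> simp

theorem pvModifyHead_comp {α : Type} (f g : α → α) (l : List α) :
    (l.modifyHead g).modifyHead f = l.modifyHead (fun a => f (g a)) := by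
  cases l <;> simp

-- A's loop equals pvSpl
theorem pvA_loop (xs : List String) : ∀ (acc : List (List String)) (buf : List String),
    (xs.foldl pvStepA (acc, buf)).1 ++ [(xs.foldl pvStepA (acc, buf)).2]
      = acc ++ (pvSpl xs).modifyHead (buf ++ ·) := by
  induction xs with
  | nil => intro acc buf; simp [pvSpl]
  | cons x xs ih =>
    intro acc buf
    by_cases hx : x == "\n"
    · simp only [List.foldl_cons, pvStepA, hx, if_pos, pvSpl]
      rw [ih]
      simp [pvModifyHead_id]
    · simp only [List.foldl_cons, pvStepA, hx, Bool.false_eq_true,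
        if_false, pvSpl]
      rw [ih, pvModifyHead_comp]
      simp

theorem pvA_eq_spl (xs : List String) : complete_all_passports xs = pvSpl xs := by
  have h := pvA_loop xs [] []
  simpa [complete_all_passports, pvModifyHead_id] using h

-- shift of enumerate's start index
theorem pvEnumerate_shift {α : Type} (xs : List α) : ∀ (s : Int),
    PySem.List.enumerate xs (s + 1) = (PySem.List.enumerate xs s).map (fun p => (p.1 + 1, p.2)) := by
  induction xs with
  | nil => intro s; simp [PySem.List.enumerate_nil]
  | cons x xs ih =>
    intro s
    rw [PySem.List.enumerate_cons, PySem.List.enumerate_cons, List.map_cons]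
    rw [show s + 1 + 1 = (s + 1) + 1 from rfl, ih (s + 1)]

theorem pvDelims_cons (x : String) (xs : List String) :
    pvDelims (x :: xs)
      = (if x == "\n" then [(0 : Int)] else []) ++ (pvDelims xs).map (· + 1) := by
  unfold pvDelims
  rw [PySem.List.enumerate_cons, show (0 : Int) + 1 = 0 + 1 from rfl, pvEnumerate_shift]
  by_cases hx : x == "\n" <;>
    simp [hx, List.filter_map, List.map_map, Function.comp_def]

theorem pvDelims_nonneg (xs : List String) : ∀ d ∈ pvDelims xs, 0 ≤ d := by
  intro d hd
  unfold pvDelims at hd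
  obtain ⟨p, hp, rfl⟩ := List.mem_map.mp hd
  have hp' := List.mem_of_mem_filter hp
  obtain ⟨k, hk, rfl⟩ := (PySem.List.mem_enumerate_iff _ _ _).mp hp'
  simp

-- drop-one shift on slices with nonnegative bounds
theorem pvSlice_shift (x : String) (xs : List String) (a b : Int) (ha : 0 ≤ a) (hb : 0 ≤ b) :
    PySem.List.slice (x :: xs) (some (a + 1)) (some (b + 1))
      = PySem.List.slice xs (some a) (some b) := by
  rw [PySem.List.slice_toNat _ (by omega : (0:Int) ≤ a + 1) (by omega : (0:Int) ≤ b + 1),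
      PySem.List.slice_toNat _ ha hb]
  have h1 : (a + 1).toNat = a.toNat + 1 := by omega
  have h2 : (b + 1).toNat = b.toNat + 1 := by omega
  rw [h1, h2]
  simp [List.drop_succ_cons]

theorem pvSlice_from_shift (x : String) (xs : List String) (a : Int) (ha : 0 ≤ a) :
    PySem.List.slice (x :: xs) (some (a + 1)) none = PySem.List.slice xs (some a) none := by
  rw [PySem.List.slice_from _ (by omega : (0:Int) ≤ a + 1), PySem.List.slice_from _ ha]
  have h1 : (a + 1).toNat = a.toNat + 1 := by omega
  rw [h1, List.drop_succ_cons]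

-- the accumulator of B's loop factors out
theorem pvB_outFactor (xs : List String) (ds : List Int) :
    ∀ (out : List (List String)) (s : Int),
    ds.foldl (pvStepB xs) (out, s)
      = (out ++ (ds.foldl (pvStepB xs) ([], s)).1, (ds.foldl (pvStepB xs) ([], s)).2) := by
  induction ds with
  | nil => intro out s; simp
  | cons d ds ih =>
    intro out s
    simp only [List.foldl_cons, pvStepB]
    rw [ih (out ++ _) (d + 1), ih ([] ++ _) (d + 1)]
    simp

-- running B's tail loop on (x :: xs) with all indices shifted by one gives the same segments
theorem pvB_tailRun (x : String) (xs : List String) (ds : List Int)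
    (hds : ∀ d ∈ ds, 0 ≤ d) :
    ∀ (out : List (List String)) (s : Int), 0 ≤ s →
    ((ds.map (· + 1)).foldl (pvStepB (x :: xs)) (out, s + 1)).1
        ++ [PySem.List.slice (x :: xs) (some ((ds.map (· + 1)).foldl (pvStepB (x :: xs)) (out, s + 1)).2) none]
      = (ds.foldl (pvStepB xs) (out, s)).1
        ++ [PySem.List.slice xs (some (ds.foldl (pvStepB xs) (out, s)).2) none] := by
  induction ds with
  | nil =>
    intro out s hs
    simp only [List.map_nil, List.foldl_nil]
    rw [pvSlice_from_shift x xs s hs]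
  | cons d ds ih =>
    intro out s hs
    have hd : 0 ≤ d := hds d (by simp)
    simp only [List.map_cons, List.foldl_cons, pvStepB]
    rw [pvSlice_shift x xs s d hs hd]
    exact ih (fun e he => hds e (by simp [he])) (out ++ _) (d + 1) (by omega)

-- B equals pvSpl
theorem pvB_eq_spl (xs : List String) : complete_all_passports_alt xs = pvSpl xs := by
  induction xs with
  | nil =>
    simp [complete_all_passports_alt, pvDelims, PySem.List.enumerate_nil, pvSpl,
      PySem.List.slice_none_none]
  | cons x xs ih =>
    unfold complete_all_passports_alt
    rw [pvDelims_cons]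
    by_cases hx : x == "\n"
    · simp only [hx, if_pos, List.singleton_append, List.foldl_cons, pvStepB]
      have h0 : PySem.List.slice (x :: xs) (some (0 : Int)) (some (0 : Int)) = [] := by
        rw [PySem.List.slice_toNat _ le_rfl le_rfl]; simp
      rw [h0]
      rw [show (0 : Int) + 1 = 0 + 1 from rfl]
      rw [pvB_tailRun x xs (pvDelims xs) (pvDelims_nonneg xs) ([] ++ [[]]) 0 le_rfl]
      rw [pvB_outFactor xs (pvDelims xs) ([] ++ [[]]) 0]
      simp only [List.nil_append, List.cons_append]
      rw [pvSpl, if_pos hx, ← ih]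
      rfl
    · simp only [hx, Bool.false_eq_true, if_false, List.nil_append]
      cases hD : pvDelims xs with
      | nil =>
        simp only [List.map_nil, List.foldl_nil]
        rw [PySem.List.slice_from _ le_rfl]
        rw [pvSpl, if_neg (by simp [hx]), ← ih]
        unfold complete_all_passports_alt
        rw [hD]
        simp only [List.foldl_nil, List.nil_append]
        rw [PySem.List.slice_from _ le_rfl]
        simp
      | cons d ds =>
        have hnn : ∀ e ∈ d :: ds, 0 ≤ e := hD ▸ pvDelims_nonneg xs
        have hd : 0 ≤ d := hnn d (by simp)
        simp only [List.map_cons, List.foldl_cons, pvStepB]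
        have h1 : PySem.List.slice (x :: xs) (some (0 : Int)) (some (d + 1))
            = x :: PySem.List.slice xs (some (0 : Int)) (some d) := by
          rw [PySem.List.slice_toNat _ le_rfl (by omega : (0:Int) ≤ d + 1),
              PySem.List.slice_toNat _ le_rfl hd]
          have h2 : (d + 1).toNat = d.toNat + 1 := by omega
          rw [h2]
          simp
        rw [h1]
        rw [pvB_tailRun x xs ds (fun e he => hnn e (by simp [he])) _ (d + 1) (by omega)]
        rw [pvB_outFactor xs ds _ (d + 1)]
        rw [pvSpl, if_neg (by simp [hx]), ← ih]
        unfold complete_all_passports_alt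
        rw [hD]
        simp only [List.foldl_cons, pvStepB]
        rw [pvB_outFactor xs ds ([] ++ _) (d + 1)]
        simp

-- ===== VERDICT (by name: the statement is the Claim_ definition above) =====
theorem complete_all_passports_spec : Claim_equal_complete_all_passports := by
  intro raw_lines _
  unfold Spec_complete_all_passports
  rw [pvA_eq_spl, pvB_eq_spl]
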